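-- pv_equiv track=rewrite | github.com/sci-umaumabaken30/keiba-scatter-v2 | sns/make_positioning_card.py | _waku_dist
-- ===== SOURCE A (Python) =====
-- def _waku_dist(n):
--     if n <= 8:
--         return [1 if i < n else 0 for i in range(8)]
--     if n <= 16:
--         a = [1] * 8
--         for i in range(n - 8):
--             a[7 - i] = 2
--         return a
--     if n == 17:
--         return [2, 2, 2, 2, 2, 2, 2, 3]
--     return [2, 2, 2, 2, 2, 2, 3, 3]
-- ===== SOURCE B (Python) =====
-- def _waku_dist(n):
--     a = [0] * 8
--     for i in range(min(max(n, 0), 8)):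
--         a[i] = 1
--     for k in range(max(min(n, 18) - 8, 0)):
--         a[7 - (k % 8)] += 1
--     return a
-- ===== Notes on version B (the rewrite author's own statement) =====
-- stated objective: alternative
-- what changed: Replaces A's four branch-selected tables (list comprehension, in-place loop on [1]*8, two hard-coded lists) by one uniform accumulation: fill 1s forward for the first min(n,8) gates, then add the 9th..18th horse backward over the gates with a single modular rule.
import Mathlib
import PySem

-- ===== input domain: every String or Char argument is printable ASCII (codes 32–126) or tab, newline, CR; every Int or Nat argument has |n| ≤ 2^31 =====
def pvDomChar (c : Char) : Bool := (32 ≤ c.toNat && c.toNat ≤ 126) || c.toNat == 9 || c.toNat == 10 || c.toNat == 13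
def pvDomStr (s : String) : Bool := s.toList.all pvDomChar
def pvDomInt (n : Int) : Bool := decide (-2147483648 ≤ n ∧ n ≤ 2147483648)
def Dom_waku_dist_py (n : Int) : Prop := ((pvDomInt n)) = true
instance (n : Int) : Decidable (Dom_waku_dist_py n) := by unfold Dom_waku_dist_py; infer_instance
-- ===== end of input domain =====

-- B replaces A's four branch-selected tables by one uniform accumulation (fill 1s forward, then
-- add the 9th..18th horse backward over the gates); objective: alternative decomposition, same cost.

-- ===== PORT A =====
-- literal port of A; in the 9..16 branch the index 7-i is in [0,7], so List.set with .toNat is exact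
def waku_dist_py (n : Int) : List Int :=
  if n ≤ 8 then
    (PySem.List.pyRange 0 8 1).map (fun i => if i < n then (1 : Int) else 0)
  else if n ≤ 16 then
    (PySem.List.pyRange 0 (n - 8) 1).foldl
      (fun a i => a.set (7 - i).toNat 2) (List.replicate 8 (1 : Int))
  else if n = 17 then
    [2, 2, 2, 2, 2, 2, 2, 3]
  else
    [2, 2, 2, 2, 2, 2, 3, 3]

-- ===== PORT B =====
-- literal port of Source B; both loop indices are nonnegative, so List.set with .toNat is exact,
-- and a[7-(k%8)] += 1 reads the current cell with getD (index always in [0,7])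
def waku_dist_py_alt (n : Int) : List Int :=
  let a := List.replicate 8 (0 : Int)
  let a := (PySem.List.pyRange 0 (min (max n 0) 8) 1).foldl
    (fun a i => a.set i.toNat 1) a
  (PySem.List.pyRange 0 (max (min n 18 - 8) 0) 1).foldl
    (fun a k =>
      let j := (7 - PySem.Int.mod k 8).toNat
      a.set j (a.getD j 0 + 1)) a

-- ===== PRECONDITION & SPEC =====
def Spec_waku_dist_py (n : Int) (out : List Int) : Prop := out = waku_dist_py_alt n
instance (n : Int) (out : List Int) : Decidable (Spec_waku_dist_py n out) := by unfold Spec_waku_dist_py; infer_instance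

-- ===== CLAIM (what is proved, stated in full; the proofs are below) =====
def Claim_equal_waku_dist_py : Prop := ∀ (n : Int), Dom_waku_dist_py n → Spec_waku_dist_py n (waku_dist_py n)

-- ===== LEMMAS AND PROOFS =====

lemma waku_A_nonpos (n : Int) (h : n ≤ 0) : waku_dist_py n = [0, 0, 0, 0, 0, 0, 0, 0] := by
  have h0 : ¬ (0 : Int) < n := by omega
  have h1 : ¬ (1 : Int) < n := by omega
  have h2 : ¬ (2 : Int) < n := by omega
  have h3 : ¬ (3 : Int) < n := by omega
  have h4 : ¬ (4 : Int) < n := by omega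
  have h5 : ¬ (5 : Int) < n := by omega
  have h6 : ¬ (6 : Int) < n := by omega
  have h7 : ¬ (7 : Int) < n := by omega
  have hle : n ≤ 8 := by omega
  simp [waku_dist_py, hle, show PySem.List.pyRange 0 8 1 = [0, 1, 2, 3, 4, 5, 6, 7] from by decide,
    h0, h1, h2, h3, h4, h5, h6, h7]

lemma waku_B_nonpos (n : Int) (h : n ≤ 0) : waku_dist_py_alt n = [0, 0, 0, 0, 0, 0, 0, 0] := by
  have e1 : min (max n 0) 8 = 0 := by omega
  have e2 : max (min n 18 - 8) 0 = 0 := by omega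
  simp only [waku_dist_py_alt, e1, e2]
  decide

lemma waku_A_big (n : Int) (h : 18 ≤ n) : waku_dist_py n = [2, 2, 2, 2, 2, 2, 3, 3] := by
  have h8 : ¬ n ≤ 8 := by omega
  have h16 : ¬ n ≤ 16 := by omega
  have h17 : ¬ n = 17 := by omega
  simp [waku_dist_py, h8, h16, h17]

lemma waku_B_big (n : Int) (h : 18 ≤ n) : waku_dist_py_alt n = [2, 2, 2, 2, 2, 2, 3, 3] := by
  have e1 : min (max n 0) 8 = 8 := by omega
  have e2 : max (min n 18 - 8) 0 = 10 := by omega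
  simp only [waku_dist_py_alt, e1, e2]
  decide

-- ===== VERDICT (by name: the statement is the Claim_ definition above) =====
theorem waku_dist_py_spec : Claim_equal_waku_dist_py := by
  intro n _
  unfold Spec_waku_dist_py
  rcases le_or_gt n 0 with h | h
  · rw [waku_A_nonpos n h, waku_B_nonpos n h]
  · rcases le_or_gt 18 n with h18 | h18
    · rw [waku_A_big n h18, waku_B_big n h18]
    · have h1 : 1 ≤ n := h
      have h2 : n ≤ 17 := by omega
      interval_cases n <;> decide
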